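-- pv_equiv track=rewrite | github.com/JohnLyu2/smt-select | smt_dedup_cluster.py | extract_first_child_expr
-- ===== SOURCE A (Python) =====
-- from typing import Dict, List, Tuple, Optional, Iterable, Any
--
-- def _skip_ws(s: str, i: int) -> int:
--     n = len(s)
--     while i < n and s[i].isspace():
--         i += 1
--     return i
--
-- def _read_symbol(s: str, i: int) -> Tuple[str, int]:
--     """Read an SMT symbol starting at i (assumes i at non-ws)."""
--     n = len(s)
--     if i >= n:
--         return "", i
--     if s[i] == "|":
--         j = i + 1
--         while j < n and s[j] != "|":
--             j += 1
--         return s[i:j+1] if j < n else s[i:], min(n, j+1)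
--     # regular symbol
--     j = i
--     while j < n and (not s[j].isspace()) and s[j] not in "()":
--         j += 1
--     return s[i:j], j
--
-- def extract_first_child_expr(s: str, i: int) -> Tuple[Optional[str], int]:
--     """
--     Extract the first S-expression or atom starting at i.
--     Returns (text, new_index).
--     """
--     n = len(s)
--     i = _skip_ws(s, i)
--     if i >= n:
--         return None, i
--     if s[i] == "(":
--         depth = 0
--         in_str = False
--         j = i
--         while j < n:
--             c = s[j]
--             if c == '"' and (j == 0 or s[j-1] != "\\"):
--                 in_str = not in_str
--             if not in_str:
--                 if c == "(":
--                     depth += 1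
--                 elif c == ")":
--                     depth -= 1
--                     if depth == 0:
--                         return s[i:j+1], j+1
--             j += 1
--         return s[i:], n
--     # atom
--     sym, j = _read_symbol(s, i)
--     return sym, j
-- ===== SOURCE B (Python) =====
-- from typing import Tuple, Optional
--
-- def _skip_ws(s: str, i: int) -> int:
--     n = len(s)
--     while i < n and s[i].isspace():
--         i += 1
--     return i
--
-- def _read_symbol(s: str, i: int) -> Tuple[str, int]:
--     """Read an SMT symbol starting at i (assumes i at non-ws)."""
--     n = len(s)
--     if i >= n:
--         return "", i
--     if s[i] == "|":
--         j = i + 1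
--         while j < n and s[j] != "|":
--             j += 1
--         return s[i:j+1] if j < n else s[i:], min(n, j+1)
--     j = i
--     while j < n and (not s[j].isspace()) and s[j] not in "()":
--         j += 1
--     return s[i:j], j
--
-- def extract_first_child_expr(s: str, i: int) -> Tuple[Optional[str], int]:
--     """
--     Extract the first S-expression or atom starting at i.
--     Returns (text, new_index).
--     """
--     n = len(s)
--     i = _skip_ws(s, i)
--     if i >= n:
--         return None, i
--     if s[i] == "(":
--         def scan(k: int) -> int:
--             # s[k] == '(' : return the index just past its matching ')', or n if unbalanced
--             j = k + 1
--             while j < n: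
--                 c = s[j]
--                 if c == "(":
--                     j = scan(j)
--                 elif c == ")":
--                     return j + 1
--                 elif c == '"' and s[j-1] != "\\":
--                     j += 1
--                     while j < n and not (s[j] == '"' and s[j-1] != "\\"):
--                         j += 1
--                     j += 1  # step past the closing quote (or beyond n if unterminated)
--                 else:
--                     j += 1
--             return n
--         end = scan(i)
--         return s[i:end], end
--     sym, j = _read_symbol(s, i)
--     return sym, j
-- ===== Notes on version B (the rewrite author's own statement) =====
-- stated objective: alternative
-- what changed: The '(' branch's flat while-loop state machine (depth counter + in_str flag + escape bookkeeping in one loop) is replaced by a recursive-descent scanner: a recursive scan over the nesting structure with a separate string-literal skipper, so no depth counter or in_str flag exists.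
-- outside the precondition, e.g. on extract_first_child_expr('")\t(\\', -3): A returns ('(\\', 5), B returns ('', 2); on extract_first_child_expr('ab', -2): A returns ('ab', 2), B returns ('ab', 2); on extract_first_child_expr('a', -5): A raises IndexError, B raises IndexError
import Mathlib
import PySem

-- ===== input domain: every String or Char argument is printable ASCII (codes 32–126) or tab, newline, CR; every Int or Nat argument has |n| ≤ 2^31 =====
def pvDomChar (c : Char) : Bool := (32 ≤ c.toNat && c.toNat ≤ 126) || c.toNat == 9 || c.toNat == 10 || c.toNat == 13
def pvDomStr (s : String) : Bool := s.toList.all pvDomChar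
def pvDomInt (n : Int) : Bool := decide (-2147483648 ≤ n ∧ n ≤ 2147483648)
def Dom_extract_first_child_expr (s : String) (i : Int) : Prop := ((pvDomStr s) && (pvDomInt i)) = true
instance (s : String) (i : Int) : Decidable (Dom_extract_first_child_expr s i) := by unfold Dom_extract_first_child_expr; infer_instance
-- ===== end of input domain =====

-- B replaces A's flat depth/in_str while-loop for the '(' case by a recursive-descent scanner
-- (recursion on nesting with a separate string-literal skipper); alternative decomposition, same cost.

-- ===== PORT A =====

-- str.isspace() for a single char; exact on Dom (printable ASCII plus tab/newline/CR)
def pvIsSpace (c : Char) : Bool := c == ' ' || c == '\t' || c == '\n' || c == '\r'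

-- _skip_ws (shared verbatim by A and B)
def pvSkipWs (cs : List Char) (n i : Int) : Int :=
  if h : i < n ∧ pvIsSpace (PySem.List.pyGetD cs i ' ') then pvSkipWs cs n (i + 1) else i
termination_by (n - i).toNat
decreasing_by have := h.1; omega

-- the 'while j < n and s[j] != "|"' loop of _read_symbol
def pvPipeLoop (cs : List Char) (n j : Int) : Int :=
  if h : j < n ∧ PySem.List.pyGetD cs j ' ' ≠ '|' then pvPipeLoop cs n (j + 1) else j
termination_by (n - j).toNat
decreasing_by have := h.1; omega

-- the 'while j < n and (not s[j].isspace()) and s[j] not in "()"' loop of _read_symbol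
def pvSymLoop (cs : List Char) (n j : Int) : Int :=
  if h : j < n ∧ ¬ pvIsSpace (PySem.List.pyGetD cs j ' ') ∧
         PySem.List.pyGetD cs j ' ' ≠ '(' ∧ PySem.List.pyGetD cs j ' ' ≠ ')' then
    pvSymLoop cs n (j + 1)
  else j
termination_by (n - j).toNat
decreasing_by have := h.1; omega

-- _read_symbol (shared verbatim by A and B)
def pvReadSymbol (cs : List Char) (i : Int) : String × Int :=
  let n : Int := cs.length
  if n ≤ i then ("", i)
  else if PySem.List.pyGetD cs i ' ' = '|' then
    let j := pvPipeLoop cs n (i + 1)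
    (if j < n then String.mk (PySem.List.slice cs (some i) (some (j + 1)))
     else String.mk (PySem.List.slice cs (some i) none),
     min n (j + 1))
  else
    let j := pvSymLoop cs n i
    (String.mk (PySem.List.slice cs (some i) (some j)), j)

-- A's 'while j < n' loop over (depth, in_str, j)
def pvALoop (cs : List Char) (n i : Int) (depth : Int) (instr : Bool) (j : Int) :
    Option String × Int :=
  if h : j < n then
    let c := PySem.List.pyGetD cs j ' '
    let instr' := if c = '"' ∧ (j = 0 ∨ PySem.List.pyGetD cs (j - 1) ' ' ≠ '\\') then !instr else instr
    if instr' then pvALoop cs n i depth instr' (j + 1)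
    else if c = '(' then pvALoop cs n i (depth + 1) instr' (j + 1)
    else if c = ')' then
      if depth - 1 = 0 then (some (String.mk (PySem.List.slice cs (some i) (some (j + 1)))), j + 1)
      else pvALoop cs n i (depth - 1) instr' (j + 1)
    else pvALoop cs n i depth instr' (j + 1)
  else (some (String.mk (PySem.List.slice cs (some i) none)), n)
termination_by (n - j).toNat
decreasing_by all_goals omega

def extract_first_child_expr (s : String) (i : Int) : Option String × Int :=
  let cs := s.toList
  let n : Int := cs.length
  let i := pvSkipWs cs n i
  if n ≤ i then (none, i)
  else if PySem.List.pyGetD cs i ' ' = '(' then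
    pvALoop cs n i 0 false i
  else
    let r := pvReadSymbol cs i
    (some r.1, r.2)

-- ===== PORT B =====

-- B's inner string-literal skip: 'while j < n and not (s[j] == '"' and s[j-1] != "\\")'
def pvStrSkip (cs : List Char) (n j : Int) : Int :=
  if h : j < n ∧ ¬ (PySem.List.pyGetD cs j ' ' = '"' ∧ PySem.List.pyGetD cs (j - 1) ' ' ≠ '\\') then
    pvStrSkip cs n (j + 1)
  else j
termination_by (n - j).toNat
decreasing_by have := h.1; omega

-- B's recursive scan, as the loop it runs after consuming the '(' at k (so scan k = pvScanLoop (k+1));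
-- the fuel argument only makes the nested recursion structurally total, it never changes the value reached
def pvScanLoop (cs : List Char) (n : Int) : Nat → Int → Int
  | 0, _ => n
  | f + 1, j =>
    if j < n then
      let c := PySem.List.pyGetD cs j ' '
      if c = '(' then pvScanLoop cs n f (pvScanLoop cs n f (j + 1))
      else if c = ')' then j + 1
      else if c = '"' ∧ PySem.List.pyGetD cs (j - 1) ' ' ≠ '\\' then
        pvScanLoop cs n f (pvStrSkip cs n (j + 1) + 1)
      else pvScanLoop cs n f (j + 1)
    else n

def extract_first_child_expr_alt (s : String) (i : Int) : Option String × Int :=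
  let cs := s.toList
  let n : Int := cs.length
  let i := pvSkipWs cs n i
  if n ≤ i then (none, i)
  else if PySem.List.pyGetD cs i ' ' = '(' then
    let e := pvScanLoop cs n (n.toNat + 1) (i + 1)
    (some (String.mk (PySem.List.slice cs (some i) (some e))), e)
  else
    let r := pvReadSymbol cs i
    (some r.1, r.2)

-- ===== PRECONDITION & SPEC =====
-- Pre_ excludes negative start indices, outside the parser's natural domain: there A raises
-- IndexError (i < -len(s)) or returns values shaped by Python's negative-index wraparound,
-- which B's recursive scanner does not reproduce on the parenthesis branch.
def Pre_extract_first_child_expr (s : String) (i : Int) : Prop := 0 ≤ i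
instance (s : String) (i : Int) : Decidable (Pre_extract_first_child_expr s i) := by
  unfold Pre_extract_first_child_expr; infer_instance

def pvWitness_extract_first_child_expr : String × Int := (" (a (b \"x\") c)", 0)

def Spec_extract_first_child_expr (s : String) (i : Int) (out : Option String × Int) : Prop :=
  out = extract_first_child_expr_alt s i
instance (s : String) (i : Int) (out : Option String × Int) :
    Decidable (Spec_extract_first_child_expr s i out) := by
  unfold Spec_extract_first_child_expr; infer_instance

-- ===== CLAIM (what is proved, stated in full; the proofs are below) =====
def Claim_equal_extract_first_child_expr : Prop :=
  ∀ (s : String) (i : Int), Dom_extract_first_child_expr s i →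
    Pre_extract_first_child_expr s i →
    Spec_extract_first_child_expr s i (extract_first_child_expr s i)

-- ===== LEMMAS AND PROOFS =====

-- B's scan with the fuel alt actually passes
def pvE (cs : List Char) (n j : Int) : Int := pvScanLoop cs n (n.toNat + 1) j

-- closing d nested levels = iterating the scanner d times
def pvChain (cs : List Char) (n : Int) : Nat → Int → Int
  | 0, j => j
  | d + 1, j => pvChain cs n d (pvE cs n j)

lemma pvSkipWs_ge (cs : List Char) (n i : Int) : i ≤ pvSkipWs cs n i := by
  fun_induction pvSkipWs cs n i <;> omega

lemma pvStrSkip_ge (cs : List Char) (n j : Int) : j ≤ pvStrSkip cs n j := by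
  fun_induction pvStrSkip cs n j <;> omega

lemma pvScanLoop_bounds (cs : List Char) (n : Int) :
    ∀ (f : Nat) (j : Int), min (j + 1) n ≤ pvScanLoop cs n f j ∧ pvScanLoop cs n f j ≤ n := by
  intro f
  induction f with
  | zero => intro j; simp only [pvScanLoop]; omega
  | succ f ih =>
    intro j
    by_cases hj : j < n
    · simp only [pvScanLoop, if_pos hj]
      split_ifs with h1 h2 h3
      · have hin := ih (j + 1)
        have hout := ih (pvScanLoop cs n f (j + 1))
        omega
      · omega
      · have hs := pvStrSkip_ge cs n (j + 1)
        have hout := ih (pvStrSkip cs n (j + 1) + 1)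
        omega
      · have := ih (j + 1); omega
    · simp only [pvScanLoop, if_neg hj]; omega

lemma pvScanLoop_of_ge (cs : List Char) (n : Int) (f : Nat) (j : Int) (h : n ≤ j) :
    pvScanLoop cs n f j = n := by
  have := pvScanLoop_bounds cs n f j
  omega

lemma pvScanLoop_fuel (cs : List Char) (n : Int) :
    ∀ (k : Nat) (j : Int) (f g : Nat), (n - j).toNat < k → (n - j).toNat < f →
      (n - j).toNat < g → pvScanLoop cs n f j = pvScanLoop cs n g j := by
  intro k
  induction k with
  | zero => intro j f g hk; omega
  | succ k ih =>
    intro j f g hk hf hg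
    obtain ⟨f, rfl⟩ : ∃ f', f = f' + 1 := ⟨f - 1, by omega⟩
    obtain ⟨g, rfl⟩ : ∃ g', g = g' + 1 := ⟨g - 1, by omega⟩
    by_cases hj : j < n
    · simp only [pvScanLoop, if_pos hj]
      have hmeas : (n - (j + 1)).toNat < k ∧ (n - (j + 1)).toNat < f ∧ (n - (j + 1)).toNat < g := by
        omega
      split_ifs with h1 h2 h3
      · have hin : pvScanLoop cs n f (j + 1) = pvScanLoop cs n g (j + 1) :=
          ih (j + 1) f g hmeas.1 hmeas.2.1 hmeas.2.2
        rw [hin]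
        set p := pvScanLoop cs n g (j + 1) with hp
        by_cases hpn : p < n
        · have hb := pvScanLoop_bounds cs n g (j + 1)
          have hple : j + 2 ≤ p := by omega
          exact ih p f g (by omega) (by omega) (by omega)
        · rw [pvScanLoop_of_ge cs n f p (by omega), pvScanLoop_of_ge cs n g p (by omega)]
      · rfl
      · have hs := pvStrSkip_ge cs n (j + 1)
        set p := pvStrSkip cs n (j + 1) + 1 with hp
        by_cases hpn : p < n
        · exact ih p f g (by omega) (by omega) (by omega)
        · rw [pvScanLoop_of_ge cs n f p (by omega), pvScanLoop_of_ge cs n g p (by omega)]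
      · exact ih (j + 1) f g hmeas.1 hmeas.2.1 hmeas.2.2
    · simp only [pvScanLoop, if_neg hj]

-- any sufficient fuel computes pvE
lemma pvScanLoop_toE (cs : List Char) (n : Int) (f : Nat) (j : Int) (hj : 0 ≤ j)
    (hf : (n - j).toNat < f) : pvScanLoop cs n f j = pvE cs n j :=
  pvScanLoop_fuel cs n ((n - j).toNat + 1) j f (n.toNat + 1) (by omega) hf (by omega)

lemma pvE_of_ge (cs : List Char) (n j : Int) (h : n ≤ j) : pvE cs n j = n :=
  pvScanLoop_of_ge cs n _ j h

-- one unfolding step of the scanner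
lemma pvE_step (cs : List Char) (n j : Int) (hj : j < n) :
    pvE cs n j =
      (if PySem.List.pyGetD cs j ' ' = '(' then
         pvScanLoop cs n n.toNat (pvScanLoop cs n n.toNat (j + 1))
       else if PySem.List.pyGetD cs j ' ' = ')' then j + 1
       else if PySem.List.pyGetD cs j ' ' = '"' ∧ PySem.List.pyGetD cs (j - 1) ' ' ≠ '\\' then
         pvScanLoop cs n n.toNat (pvStrSkip cs n (j + 1) + 1)
       else pvScanLoop cs n n.toNat (j + 1)) := by
  simp only [pvE, pvScanLoop, if_pos hj]

lemma pvChain_n (cs : List Char) (n : Int) : ∀ d : Nat, pvChain cs n d n = n := by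
  intro d
  induction d with
  | zero => rfl
  | succ d ih => simp only [pvChain, pvE_of_ge cs n n le_rfl, ih]

-- s[i:] = s[i:n] for 0 ≤ i and n = len(s)
lemma pvSliceAll (cs : List Char) (i : Int) (hi : 0 ≤ i) :
    PySem.List.slice cs (some i) none = PySem.List.slice cs (some i) (some (cs.length : Int)) := by
  obtain ⟨a, rfl⟩ : ∃ a : Nat, i = (a : Int) := ⟨i.toNat, by omega⟩
  rw [PySem.List.slice_from_natCast, PySem.List.slice_natCast]
  rw [List.take_of_length_le (by simp)]

-- A's loop in the in_str = true state runs to the closing quote (or the end of the string)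
lemma pvALoop_instr (cs : List Char) (n i : Int) :
    ∀ (k : Nat) (j : Int) (d : Int), (n - j).toNat < k → 1 ≤ j →
      pvALoop cs n i d true j =
        if pvStrSkip cs n j < n then pvALoop cs n i d false (pvStrSkip cs n j + 1)
        else (some (String.mk (PySem.List.slice cs (some i) none)), n) := by
  intro k
  induction k with
  | zero => intro j d hk; omega
  | succ k ih =>
    intro j d hk hj1
    by_cases hj : j < n
    · rw [pvALoop]
      simp only [dif_pos hj]
      by_cases hq : PySem.List.pyGetD cs j ' ' = '"' ∧
          (j = 0 ∨ PySem.List.pyGetD cs (j - 1) ' ' ≠ '\\')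
      · -- unescaped quote: A leaves the string; B's skipper stops here
        rw [if_pos hq]
        have hstop : pvStrSkip cs n j = j := by
          rw [pvStrSkip, dif_neg]
          rintro ⟨-, hcon⟩
          exact hcon ⟨hq.1, hq.2.resolve_left (by omega)⟩
        simp only [Bool.not_true, hq.1]
        rw [if_neg (by decide), if_neg (by decide), if_neg (by decide), hstop, if_pos hj]
      · rw [if_neg hq, if_pos rfl]
        have hskip : pvStrSkip cs n j = pvStrSkip cs n (j + 1) := by
          rw [pvStrSkip, dif_pos]
          refine ⟨hj, ?_⟩
          intro hcon
          exact hq ⟨hcon.1, Or.inr hcon.2⟩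
        rw [ih (j + 1) d (by omega) (by omega), hskip]
    · rw [pvALoop]
      simp only [dif_neg hj]
      have : ¬ pvStrSkip cs n j < n := by
        have := pvStrSkip_ge cs n j; omega
      rw [if_neg this]

-- A's depth loop from depth d+1 = iterating B's scanner d+1 times
lemma pvALoop_scan (cs : List Char) (n i : Int) (hn : n = (cs.length : Int)) (hi : 0 ≤ i) :
    ∀ (k : Nat) (d : Nat) (j : Int), (n - j).toNat < k → 1 ≤ j →
      pvALoop cs n i ((d : Int) + 1) false j =
        (some (String.mk (PySem.List.slice cs (some i) (some (pvChain cs n (d + 1) j)))),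
          pvChain cs n (d + 1) j) := by
  intro k
  induction k with
  | zero => intro d j hk; omega
  | succ k ih =>
    intro d j hk hj1
    by_cases hj : j < n
    · have hn2 : 2 ≤ n := by omega
      rw [pvALoop]
      simp only [dif_pos hj]
      by_cases hq : PySem.List.pyGetD cs j ' ' = '"' ∧
          (j = 0 ∨ PySem.List.pyGetD cs (j - 1) ' ' ≠ '\\')
      · -- quote branch
        rw [if_pos hq, if_pos (by decide)]
        simp only [Bool.not_false]
        have hqq : PySem.List.pyGetD cs (j - 1) ' ' ≠ '\\' := hq.2.resolve_left (by omega)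
        have hEunf : pvE cs n j = pvScanLoop cs n n.toNat (pvStrSkip cs n (j + 1) + 1) := by
          rw [pvE_step cs n j hj]
          rw [if_neg (by rw [hq.1]; decide), if_neg (by rw [hq.1]; decide),
            if_pos ⟨hq.1, hqq⟩]
        have hs := pvStrSkip_ge cs n (j + 1)
        rw [pvALoop_instr cs n i (k + 1) (j + 1) _ (by omega) (by omega)]
        set q := pvStrSkip cs n (j + 1) with hqdef
        by_cases hqn : q < n
        · rw [if_pos hqn, ih d (q + 1) (by omega) (by omega)]
          have : pvE cs n j = pvE cs n (q + 1) := by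
            rw [hEunf]
            exact pvScanLoop_toE cs n n.toNat (q + 1) (by omega) (by omega)
          simp only [pvChain, this]
        · rw [if_neg hqn]
          have hEn : pvE cs n j = n := by
            rw [hEunf, pvScanLoop_of_ge cs n _ _ (by omega)]
          have hch : pvChain cs n (d + 1) j = n := by
            simp only [pvChain, hEn, pvChain_n]
          rw [hch, pvSliceAll cs i hi, hn]
      · rw [if_neg hq, if_neg (by decide)]
        by_cases hc : PySem.List.pyGetD cs j ' ' = '('
        · -- nested open paren: A bumps depth, B recurses
          rw [if_pos hc]
          have hrec : pvALoop cs n i ((d : Int) + 1 + 1) false (j + 1) =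
              pvALoop cs n i (((d + 1 : Nat) : Int) + 1) false (j + 1) := by push_cast; ring_nf
          rw [hrec, ih (d + 1) (j + 1) (by omega) (by omega)]
          have hEopen : pvE cs n j = pvE cs n (pvE cs n (j + 1)) := by
            rw [pvE_step cs n j hj, if_pos hc]
            rw [pvScanLoop_toE cs n _ (j + 1) (by omega) (by omega)]
            set p := pvE cs n (j + 1) with hpdef
            by_cases hpn : p < n
            · have hb := pvScanLoop_bounds cs n (n.toNat + 1) (j + 1)
              rw [← pvE] at hb
              rw [← hpdef] at hb
              exact pvScanLoop_toE cs n _ p (by omega) (by omega)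
            · rw [pvScanLoop_of_ge cs n _ p (by omega), pvE_of_ge cs n p (by omega)]
          have : pvChain cs n (d + 1 + 1) (j + 1) = pvChain cs n (d + 1) j := by
            simp only [pvChain, hEopen]
          rw [this]
        · rw [if_neg hc]
          by_cases hc2 : PySem.List.pyGetD cs j ' ' = ')'
          · rw [if_pos hc2]
            have hEclose : pvE cs n j = j + 1 := by
              rw [pvE_step cs n j hj, if_neg hc, if_pos hc2]
            match d with
            | 0 =>
              rw [if_pos (by norm_num)]
              have : pvChain cs n 1 j = j + 1 := by simp only [pvChain, hEclose]
              rw [this]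
            | d + 1 =>
              rw [if_neg (by push_cast; omega)]
              have hrec : pvALoop cs n i (((d + 1 : Nat) : Int) + 1 - 1) false (j + 1) =
                  pvALoop cs n i ((d : Int) + 1) false (j + 1) := by push_cast; ring_nf
              rw [hrec, ih d (j + 1) (by omega) (by omega)]
              have : pvChain cs n (d + 1 + 1) j = pvChain cs n (d + 1) (j + 1) := by
                simp only [pvChain, hEclose]
              rw [this]
          · rw [if_neg hc2, ih d (j + 1) (by omega) (by omega)]
            have hEstep : pvE cs n j = pvE cs n (j + 1) := by
              rw [pvE_step cs n j hj, if_neg hc, if_neg hc2, if_neg (by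
                  intro hcon
                  exact hq ⟨hcon.1, Or.inr hcon.2⟩)]
              exact pvScanLoop_toE cs n _ (j + 1) (by omega) (by omega)
            have : pvChain cs n (d + 1) j = pvChain cs n (d + 1) (j + 1) := by
              simp only [pvChain, hEstep]
            rw [this]
    · rw [pvALoop]
      simp only [dif_neg hj]
      have hE : pvE cs n j = n := pvE_of_ge cs n j (by omega)
      have hch : pvChain cs n (d + 1) j = n := by simp only [pvChain, hE, pvChain_n]
      rw [hch, pvSliceAll cs i hi, hn]

-- the '(' branch: A's loop from depth 0 equals one full scan of B
lemma pvParenBranch (cs : List Char) (n i' : Int) (hn : n = (cs.length : Int)) (hi0 : 0 ≤ i')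
    (hlt : i' < n) (hpar : PySem.List.pyGetD cs i' ' ' = '(') :
    pvALoop cs n i' 0 false i' =
      (some (String.mk (PySem.List.slice cs (some i')
          (some (pvScanLoop cs n (n.toNat + 1) (i' + 1))))),
        pvScanLoop cs n (n.toNat + 1) (i' + 1)) := by
  rw [pvALoop]
  simp only [dif_pos hlt]
  have hcond : ¬ (PySem.List.pyGetD cs i' ' ' = '"' ∧
      (i' = 0 ∨ PySem.List.pyGetD cs (i' - 1) ' ' ≠ '\\')) := by
    rw [hpar]; rintro ⟨hcon, -⟩; exact absurd hcon (by decide)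
  rw [if_neg hcond, if_neg (by decide), if_pos hpar]
  have h01 : (0 : Int) + 1 = ((0 : Nat) : Int) + 1 := by norm_num
  rw [h01, pvALoop_scan cs n i' hn hi0 ((n - (i' + 1)).toNat + 1) 0 (i' + 1) (by omega) (by omega)]
  simp only [pvChain, pvE]

-- ===== VERDICT (by name: the statement is the Claim_ definition above) =====
theorem extract_first_child_expr_spec : Claim_equal_extract_first_child_expr := by
  intro s i _ hpre
  show extract_first_child_expr s i = extract_first_child_expr_alt s i
  simp only [extract_first_child_expr, extract_first_child_expr_alt]
  have hge : 0 ≤ pvSkipWs s.toList (s.toList.length : Int) i :=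
    le_trans hpre (pvSkipWs_ge s.toList (s.toList.length : Int) i)
  by_cases hend : (s.toList.length : Int) ≤ pvSkipWs s.toList (s.toList.length : Int) i
  · rw [if_pos hend, if_pos hend]
  · rw [if_neg hend, if_neg hend]
    by_cases hpar :
        PySem.List.pyGetD s.toList (pvSkipWs s.toList (s.toList.length : Int) i) ' ' = '('
    · rw [if_pos hpar, if_pos hpar]
      exact pvParenBranch s.toList (s.toList.length : Int) _ rfl hge (by omega) hpar
    · rw [if_neg hpar, if_neg hpar]
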